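-- pv_equiv track=rewrite | github.com/morokyuu/distance_sensor_GP2D12 | kinji-kyokusen.py | search_ran
-- ===== SOURCE A (Python) =====
-- def search_ran(xspan,yspan,xa):
--     for i in range(len(xspan)-1):
--         if xspan[i] >= xa and xa > xspan[i+1]:
--             kx = (xspan[i],xspan[i+1])
--             ky = (yspan[i],yspan[i+1])
--             return kx,ky
--     if xspan[0] < xa:
--         kx = (xspan[0],xspan[1])
--         ky = (yspan[0],yspan[1])
--     else:
--         kx = (xspan[-2],xspan[-1])
--         ky = (yspan[-2],yspan[-1])
--     return kx,ky
-- ===== SOURCE B (Python) =====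
-- def search_ran(xspan, yspan, xa):
--     # Bracket search as pattern matching: mark each knot by whether it is >= xa,
--     # then the bracketing interval is the first falling edge 'TF' in that mask.
--     flags = ''.join('T' if x >= xa else 'F' for x in xspan)
--     i = flags.find('TF')
--     if i < 0:
--         i = 0 if xspan[0] < xa else -2
--     return (xspan[i], xspan[i + 1]), (yspan[i], yspan[i + 1])
-- ===== Notes on version B (the rewrite author's own statement) =====
-- stated objective: alternative
-- what changed: A's index loop over adjacent pairs with an early return and three duplicated tuple-building branches is replaced by a threshold bitmask: each knot is marked 'T'/'F' by x >= xa, the bracketing interval is located as the first falling edge 'TF' via str.find, and one unified subscript build (with negative index -2 as the low fallback) produces the result.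
import Mathlib
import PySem

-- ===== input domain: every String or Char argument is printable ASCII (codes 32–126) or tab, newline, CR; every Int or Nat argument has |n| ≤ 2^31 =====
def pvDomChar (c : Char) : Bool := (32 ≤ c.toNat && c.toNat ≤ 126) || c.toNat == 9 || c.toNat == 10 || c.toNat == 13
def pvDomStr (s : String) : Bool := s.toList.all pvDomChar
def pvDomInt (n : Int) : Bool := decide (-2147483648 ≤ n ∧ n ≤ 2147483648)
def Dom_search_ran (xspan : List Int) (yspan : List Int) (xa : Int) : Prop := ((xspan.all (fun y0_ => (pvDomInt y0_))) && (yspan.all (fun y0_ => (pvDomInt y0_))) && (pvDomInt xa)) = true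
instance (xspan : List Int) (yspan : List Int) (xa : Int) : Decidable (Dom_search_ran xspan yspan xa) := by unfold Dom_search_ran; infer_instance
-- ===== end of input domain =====

-- B replaces A's index loop over adjacent pairs (with three duplicated tuple-building branches)
-- by a threshold bitmask: each knot is marked 'T'/'F' by x >= xa, the bracketing interval is the
-- first falling edge 'TF' found by str.find, and one unified subscript build (negative index -2
-- for the low fallback) produces the result (objective: alternative algorithm, same O(n) cost).

-- ===== PORT A =====
-- A's loop 'for i in range(len(xspan)-1): if …: return kx,ky' as recursion over the index list
def srA_loop (xspan : List Int) (yspan : List Int) (xa : Int) : List Int → Option ((Int × Int) × (Int × Int))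
  | [] => none
  | i :: rest =>
    if PySem.List.pyGetD xspan i 0 ≥ xa ∧ xa > PySem.List.pyGetD xspan (i + 1) 0 then
      some ((PySem.List.pyGetD xspan i 0, PySem.List.pyGetD xspan (i + 1) 0),
            (PySem.List.pyGetD yspan i 0, PySem.List.pyGetD yspan (i + 1) 0))
    else srA_loop xspan yspan xa rest

-- indexing uses pyGetD (in range on every input admitted by Pre_search_ran)
def search_ran (xspan : List Int) (yspan : List Int) (xa : Int) : (Int × Int) × (Int × Int) :=
  match srA_loop xspan yspan xa (PySem.List.pyRange 0 ((xspan.length : Int) - 1) 1) with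
  | some r => r
  | none =>
    if PySem.List.pyGetD xspan 0 0 < xa then
      ((PySem.List.pyGetD xspan 0 0, PySem.List.pyGetD xspan 1 0),
       (PySem.List.pyGetD yspan 0 0, PySem.List.pyGetD yspan 1 0))
    else
      ((PySem.List.pyGetD xspan (-2) 0, PySem.List.pyGetD xspan (-1) 0),
       (PySem.List.pyGetD yspan (-2) 0, PySem.List.pyGetD yspan (-1) 0))

-- ===== PORT B =====
def search_ran_alt (xspan : List Int) (yspan : List Int) (xa : Int) : (Int × Int) × (Int × Int) :=
  let flags : List Char := xspan.map (fun x => if x ≥ xa then 'T' else 'F')   -- ''.join('T' if … else 'F' …)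
  let i0 : Int := PySem.Chars.find flags ['T', 'F']                           -- flags.find('TF')
  let i : Int := if i0 < 0 then (if PySem.List.pyGetD xspan 0 0 < xa then 0 else -2) else i0
  ((PySem.List.pyGetD xspan i 0, PySem.List.pyGetD xspan (i + 1) 0),
   (PySem.List.pyGetD yspan i 0, PySem.List.pyGetD yspan (i + 1) 0))

-- ===== PRECONDITION & SPEC =====
-- Pre_ excludes exactly the inputs on which A raises IndexError: fewer than two points in either
-- list, or a first bracketing pair whose index i has i+1 past yspan's end.
def Pre_search_ran (xspan : List Int) (yspan : List Int) (xa : Int) : Prop :=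
  2 ≤ xspan.length ∧ 2 ≤ yspan.length ∧
    ∀ i < xspan.length - 1,
      ((xa ≤ xspan.getD i 0 ∧ xspan.getD (i + 1) 0 < xa) ∧
        ∀ j < i, ¬ (xa ≤ xspan.getD j 0 ∧ xspan.getD (j + 1) 0 < xa)) →
      i + 1 < yspan.length

instance (xspan : List Int) (yspan : List Int) (xa : Int) : Decidable (Pre_search_ran xspan yspan xa) := by
  unfold Pre_search_ran; infer_instance

def pvWitness_search_ran : List Int × List Int × Int := ([5, 3], [10, 20], 4)

def Spec_search_ran (xspan : List Int) (yspan : List Int) (xa : Int) (out : (Int × Int) × (Int × Int)) : Prop := out = search_ran_alt xspan yspan xa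
instance (xspan : List Int) (yspan : List Int) (xa : Int) (out : (Int × Int) × (Int × Int)) : Decidable (Spec_search_ran xspan yspan xa out) := by unfold Spec_search_ran; infer_instance

-- ===== CLAIM (what is proved, stated in full; the proofs are below) =====
def Claim_equal_search_ran : Prop := ∀ (xspan : List Int) (yspan : List Int) (xa : Int), Dom_search_ran xspan yspan xa → Pre_search_ran xspan yspan xa → Spec_search_ran xspan yspan xa (search_ran xspan yspan xa)

-- ===== LEMMAS AND PROOFS =====

theorem srA_loop_eq_find? (xspan yspan : List Int) (xa : Int) (l : List Int) :
    srA_loop xspan yspan xa l =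
      (l.find? (fun i => decide (PySem.List.pyGetD xspan i 0 ≥ xa ∧ xa > PySem.List.pyGetD xspan (i + 1) 0))).map
        (fun i => ((PySem.List.pyGetD xspan i 0, PySem.List.pyGetD xspan (i + 1) 0),
                   (PySem.List.pyGetD yspan i 0, PySem.List.pyGetD yspan (i + 1) 0))) := by
  induction l with
  | nil => rfl
  | cons i rest ih =>
    by_cases h : PySem.List.pyGetD xspan i 0 ≥ xa ∧ xa > PySem.List.pyGetD xspan (i + 1) 0 <;>
      simp [srA_loop, h, ih]

-- 'TF' is a prefix of flags.drop k iff index k is a falling edge of the threshold mask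
theorem pv_prefix_iff (xspan : List Int) (xa : Int) (k : ℕ) :
    (['T', 'F'] <+: (xspan.map (fun x => if x ≥ xa then 'T' else 'F')).drop k) ↔
      (k + 1 < xspan.length ∧
        xa ≤ xspan.getD k 0 ∧ xspan.getD (k + 1) 0 < xa) := by
  have hfl : (xspan.map (fun x => if x ≥ xa then 'T' else 'F')).length = xspan.length := by simp
  constructor
  · rintro ⟨t, ht⟩
    have hlen : k + 2 ≤ xspan.length := by
      have := congrArg List.length ht
      simp [List.length_drop] at this
      omega
    have hk1 : k + 1 < xspan.length := by omega
    rw [List.drop_eq_getElem_cons (by omega : k < (xspan.map (fun x => if x ≥ xa then 'T' else 'F')).length),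
        List.drop_eq_getElem_cons (by omega : k + 1 < (xspan.map (fun x => if x ≥ xa then 'T' else 'F')).length)] at ht
    simp only [List.cons_append, List.nil_append, List.cons.injEq, List.getElem_map] at ht
    obtain ⟨h1, h2, -⟩ := ht
    refine ⟨hk1, ?_, ?_⟩
    · rw [List.getD_eq_getElem _ _ (by omega)]
      by_cases h : xspan[k] ≥ xa
      · exact h
      · simp [h] at h1
    · rw [List.getD_eq_getElem _ _ (by omega)]
      by_cases h : xspan[k+1] ≥ xa
      · simp [h] at h2
      · omega
  · rintro ⟨hk1, hT, hF⟩
    refine ⟨(xspan.map (fun x => if x ≥ xa then 'T' else 'F')).drop (k + 2), ?_⟩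
    rw [List.drop_eq_getElem_cons (by omega : k < (xspan.map (fun x => if x ≥ xa then 'T' else 'F')).length),
        List.drop_eq_getElem_cons (by omega : k + 1 < (xspan.map (fun x => if x ≥ xa then 'T' else 'F')).length)]
    rw [List.getD_eq_getElem _ _ (by omega)] at hT
    rw [List.getD_eq_getElem _ _ (by omega)] at hF
    simp only [List.cons_append, List.nil_append, List.cons.injEq, List.getElem_map]
    refine ⟨by simp [hT], by simp [show ¬ xspan[k+1] ≥ xa by omega], trivial⟩

-- first match of the range scan = str.find of the edge, some case
theorem pv_find?_range_eq_some {q : ℕ → Bool} {n k : ℕ} (hk : k < n) (hq : q k = true)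
    (hmin : ∀ j < k, q j = false) : (List.range n).find? q = some k := by
  have hsplit : List.range n = List.range (k + 1) ++ (List.range (n - (k + 1))).map (fun j => k + 1 + j) := by
    rw [← List.range_add]
    congr 1
    omega
  rw [hsplit, List.find?_append]
  have h0 : (List.range k).find? q = none := by
    rw [List.find?_eq_none]
    intro x hx
    simp only [List.mem_range] at hx
    simp [hmin x hx]
  rw [List.range_succ, List.find?_append, h0]
  simp [hq]

theorem search_ran_eq_alt (xspan yspan : List Int) (xa : Int) :
    search_ran xspan yspan xa = search_ran_alt xspan yspan xa := by
  have hbridge : ∀ k : ℕ, k + 1 < xspan.length →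
      ((decide (PySem.List.pyGetD xspan (↑k) 0 ≥ xa ∧ xa > PySem.List.pyGetD xspan (↑k + 1) 0)) = true ↔
        (['T', 'F'] <+: (xspan.map (fun x => if x ≥ xa then 'T' else 'F')).drop k)) := by
    intro k hk
    rw [pv_prefix_iff]
    have e1 : PySem.List.pyGetD xspan (↑k) 0 = xspan[k]'(by omega) :=
      PySem.List.pyGetD_eq_getElem xspan 0 (by omega) (by exact_mod_cast (by omega : k < xspan.length))
    have ec : (↑k + 1 : ℤ) = ((k + 1 : ℕ) : ℤ) := by push_cast; ring
    have e2 : PySem.List.pyGetD xspan (↑k + 1) 0 = xspan[k+1]'(by omega) := by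
      rw [ec]
      exact PySem.List.pyGetD_eq_getElem xspan 0 (by omega) (by exact_mod_cast hk)
    rw [e1, e2, List.getD_eq_getElem _ _ (by omega : k < xspan.length),
        List.getD_eq_getElem _ _ hk]
    simp only [decide_eq_true_eq]
    constructor
    · rintro ⟨ha, hb⟩; exact ⟨hk, ha, hb⟩
    · rintro ⟨-, ha, hb⟩; exact ⟨ha, hb⟩
  have hm : ((xspan.length : ℤ) - 1 - 0).toNat = xspan.length - 1 := by omega
  unfold search_ran search_ran_alt
  rw [srA_loop_eq_find?, PySem.List.pyRange_one, hm, List.find?_map]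
  simp only [Function.comp_def, zero_add, Option.map_map]
  by_cases hneg : PySem.Chars.find (xspan.map (fun x => if x ≥ xa then 'T' else 'F')) ['T', 'F'] < 0
  · -- no falling edge: both take the fallback
    have hm1 : PySem.Chars.find (xspan.map (fun x => if x ≥ xa then 'T' else 'F')) ['T', 'F'] = -1 :=
      le_antisymm (by omega) (PySem.Chars.neg_one_le_find _ _)
    have hno : ∀ j : ℕ, ¬ (['T', 'F'] <+: (xspan.map (fun x => if x ≥ xa then 'T' else 'F')).drop j) := by
      intro j hj
      have hin : PySem.Chars.isIn ['T', 'F'] (xspan.map (fun x => if x ≥ xa then 'T' else 'F')) = true :=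
        (PySem.Chars.exists_prefix_drop_iff_isIn _ _).mp ⟨j, hj⟩
      rw [PySem.Chars.isIn_iff_infix] at hin
      exact ((PySem.Chars.find_eq_neg_one_iff _ _).mp hm1) hin
    have hnone : (List.range (xspan.length - 1)).find?
        (fun k : ℕ => decide (PySem.List.pyGetD xspan (↑k) 0 ≥ xa ∧ xa > PySem.List.pyGetD xspan (↑k + 1) 0)) = none := by
      rw [List.find?_eq_none]
      intro x hx
      simp only [List.mem_range] at hx
      intro hc
      exact hno x ((hbridge x (by omega)).mp hc)
    rw [hnone]
    simp only [Option.map_none, hneg, if_true]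
    split
    · norm_num
    · norm_num
  · -- falling edge at f = find ≥ 0: both pick index f
    have hf0 : 0 ≤ PySem.Chars.find (xspan.map (fun x => if x ≥ xa then 'T' else 'F')) ['T', 'F'] := by omega
    obtain ⟨hpre, hmin⟩ := PySem.Chars.find_spec hf0
    have hk1 : (PySem.Chars.find (xspan.map (fun x => if x ≥ xa then 'T' else 'F')) ['T', 'F']).toNat + 1 < xspan.length :=
      ((pv_prefix_iff xspan xa _).mp hpre).1
    have hsome : (List.range (xspan.length - 1)).find?
        (fun k : ℕ => decide (PySem.List.pyGetD xspan (↑k) 0 ≥ xa ∧ xa > PySem.List.pyGetD xspan (↑k + 1) 0)) =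
        some (PySem.Chars.find (xspan.map (fun x => if x ≥ xa then 'T' else 'F')) ['T', 'F']).toNat := by
      apply pv_find?_range_eq_some (by omega)
      · exact (hbridge _ hk1).mpr hpre
      · intro j hj
        by_contra hcon
        have hjt : decide (PySem.List.pyGetD xspan (↑j) 0 ≥ xa ∧ xa > PySem.List.pyGetD xspan (↑j + 1) 0) = true := by
          revert hcon; cases decide (PySem.List.pyGetD xspan (↑j) 0 ≥ xa ∧ xa > PySem.List.pyGetD xspan (↑j + 1) 0) <;> simp
        exact hmin j hj ((hbridge j (by omega)).mp hjt)
    rw [hsome]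
    have hcast : ((( PySem.Chars.find (xspan.map (fun x => if x ≥ xa then 'T' else 'F')) ['T', 'F']).toNat : ℤ)) =
        PySem.Chars.find (xspan.map (fun x => if x ≥ xa then 'T' else 'F')) ['T', 'F'] := Int.toNat_of_nonneg hf0
    simp only [Option.map_some, hneg, if_false, hcast]

-- ===== VERDICT (by name: the statement is the Claim_ definition above) =====
theorem search_ran_spec : Claim_equal_search_ran := by
  intro xspan yspan xa _ hpre
  unfold Spec_search_ran
  exact search_ran_eq_alt xspan yspan xa
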